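-- pv_equiv track=rewrite | github.com/pawamoy/git-ew | src/git_ew/_internal/email_parser.py | extract_quoted_text
-- ===== SOURCE A (Python) =====
-- def extract_quoted_text(body: str) -> tuple[str, str]:
--     """Separate new content from quoted text.
--
--     Args:
--         body: Email body.
--
--     Returns:
--         Tuple of (new_content, quoted_content).
--     """
--     lines = body.split("\n")
--     new_lines = []
--     quoted_lines = []
--     in_quote = False
--
--     for line in lines:
--         stripped = line.strip()
--         # Common quote indicators
--         if stripped.startswith((">", "|")):
--             in_quote = True
--             quoted_lines.append(line)
--         elif stripped.startswith("On ") and " wrote:" in line: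
--             # "On [date] [person] wrote:" pattern
--             in_quote = True
--             quoted_lines.append(line)
--         elif in_quote:
--             quoted_lines.append(line)
--         else:
--             new_lines.append(line)
--
--     return "\n".join(new_lines).strip(), "\n".join(quoted_lines).strip()
-- ===== SOURCE B (Python) =====
-- def extract_quoted_text(body: str) -> tuple[str, str]:
--     """Separate new content from quoted text."""
--     lines = body.split("\n")
--
--     def is_trigger(line: str) -> bool:
--         stripped = line.strip()
--         return stripped.startswith((">", "|")) or (
--             stripped.startswith("On ") and " wrote:" in line
--         )
--
--     i = next((k for k, line in enumerate(lines) if is_trigger(line)), len(lines))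
--     return "\n".join(lines[:i]).strip(), "\n".join(lines[i:]).strip()
-- ===== Notes on version B (the rewrite author's own statement) =====
-- stated objective: simpler
-- what changed: Since in_quote is never reset, B replaces the dual-bucket streaming loop with finding the index of the first trigger line and splitting the line list there with slices.
import Mathlib
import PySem

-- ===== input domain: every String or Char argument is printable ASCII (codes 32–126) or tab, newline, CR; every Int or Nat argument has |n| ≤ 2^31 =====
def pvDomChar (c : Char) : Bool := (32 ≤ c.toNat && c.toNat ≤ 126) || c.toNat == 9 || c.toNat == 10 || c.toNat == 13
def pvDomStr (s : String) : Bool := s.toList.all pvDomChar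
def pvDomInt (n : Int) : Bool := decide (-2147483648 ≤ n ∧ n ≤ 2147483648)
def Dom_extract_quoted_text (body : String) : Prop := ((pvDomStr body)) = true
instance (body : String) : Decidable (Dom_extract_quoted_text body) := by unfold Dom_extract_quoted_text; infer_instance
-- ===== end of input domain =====

-- B replaces A's dual-bucket streaming loop (whose in_quote flag is never reset) by
-- locating the first trigger line and splitting the line list there; return value only, no mutation.

-- ===== PORT A =====
-- the for-loop of A: state (new_lines, quoted_lines, in_quote)
def pvLoopA : List String → List String → List String → Bool → List String × List String
  | [], newL, quotedL, _ => (newL, quotedL)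
  | l :: rest, newL, quotedL, inq =>
    let stripped := PySem.Str.strip l
    if PySem.Str.startswith stripped ">" || PySem.Str.startswith stripped "|" then
      pvLoopA rest newL (quotedL ++ [l]) true
    else if PySem.Str.startswith stripped "On " && PySem.Str.isIn " wrote:" l then
      pvLoopA rest newL (quotedL ++ [l]) true
    else if inq then
      pvLoopA rest newL (quotedL ++ [l]) inq
    else
      pvLoopA rest (newL ++ [l]) quotedL inq

-- body.split("\n"): split? is none only for sep = "", so .getD [] is exact here
def extract_quoted_text (body : String) : String × String :=
  let lines := (PySem.Str.split? body "\n").getD []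
  let res := pvLoopA lines [] [] false
  (PySem.Str.strip (PySem.Str.join "\n" res.1), PySem.Str.strip (PySem.Str.join "\n" res.2))

-- ===== PORT B =====
def pvIsTrigger (line : String) : Bool :=
  let stripped := PySem.Str.strip line
  (PySem.Str.startswith stripped ">" || PySem.Str.startswith stripped "|")
    || (PySem.Str.startswith stripped "On " && PySem.Str.isIn " wrote:" line)

def extract_quoted_text_alt (body : String) : String × String :=
  let lines := (PySem.Str.split? body "\n").getD []
  let i := (List.findIdx? pvIsTrigger lines).getD lines.length
  (PySem.Str.strip (PySem.Str.join "\n" (List.take i lines)),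
   PySem.Str.strip (PySem.Str.join "\n" (List.drop i lines)))

-- ===== PRECONDITION & SPEC =====
def Spec_extract_quoted_text (body : String) (out : String × String) : Prop := out = extract_quoted_text_alt body
instance (body : String) (out : String × String) : Decidable (Spec_extract_quoted_text body out) := by unfold Spec_extract_quoted_text; infer_instance

-- ===== CLAIM (what is proved, stated in full; the proofs are below) =====
def Claim_equal_extract_quoted_text : Prop := ∀ (body : String), Dom_extract_quoted_text body → Spec_extract_quoted_text body (extract_quoted_text body)

-- ===== LEMMAS AND PROOFS =====

-- once in_quote is true, every remaining line is appended to quoted_lines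
lemma pvLoopA_true (ls : List String) : ∀ newL quotedL,
    pvLoopA ls newL quotedL true = (newL, quotedL ++ ls) := by
  induction ls with
  | nil => simp [pvLoopA]
  | cons l rest ih =>
    intro newL quotedL
    simp only [pvLoopA]
    split_ifs <;> simp [ih]

-- with in_quote still false, A splits the lines at the first trigger line
lemma pvLoopA_false (ls : List String) : ∀ newL quotedL,
    pvLoopA ls newL quotedL false =
      (newL ++ ls.takeWhile (fun l => !pvIsTrigger l),
       quotedL ++ ls.dropWhile (fun l => !pvIsTrigger l)) := by
  induction ls with
  | nil => simp [pvLoopA]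
  | cons l rest ih =>
    intro newL quotedL
    by_cases h1 : (PySem.Str.startswith (PySem.Str.strip l) ">"
        || PySem.Str.startswith (PySem.Str.strip l) "|") = true
    · have ht : pvIsTrigger l = true := by
        simp only [pvIsTrigger]; rw [h1, Bool.true_or]
      simp only [pvLoopA, if_pos h1, pvLoopA_true, List.takeWhile_cons, List.dropWhile_cons, ht]
      simp
    · by_cases h2 : (PySem.Str.startswith (PySem.Str.strip l) "On "
          && PySem.Str.isIn " wrote:" l) = true
      · have ht : pvIsTrigger l = true := by
          simp only [pvIsTrigger]; rw [h2, Bool.or_true]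
        simp only [pvLoopA, if_neg h1, if_pos h2, pvLoopA_true, List.takeWhile_cons,
          List.dropWhile_cons, ht]
        simp
      · have ht : pvIsTrigger l = false := by
          have h1' := h1; have h2' := h2
          simp only [Bool.not_eq_true] at h1' h2'
          simp only [pvIsTrigger]; rw [h1', h2', Bool.or_false]
        simp only [pvLoopA, if_neg h1, if_neg h2, if_neg (by simp : ¬ (false = true)), ih,
          List.takeWhile_cons, List.dropWhile_cons, ht]
        simp

-- B's index split coincides with takeWhile/dropWhile of the negated trigger
lemma pvFindIdx_take_drop {α : Type} (p : α → Bool) (ls : List α) :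
    List.take ((List.findIdx? p ls).getD ls.length) ls = ls.takeWhile (fun x => !p x) ∧
    List.drop ((List.findIdx? p ls).getD ls.length) ls = ls.dropWhile (fun x => !p x) := by
  induction ls with
  | nil => simp
  | cons x rest ih =>
    by_cases h : p x = true
    · simp [List.findIdx?_cons, h, List.takeWhile, List.dropWhile]
    · simp only [List.findIdx?_cons, h, List.takeWhile_cons, List.dropWhile_cons]
      cases hf : List.findIdx? p rest with
      | none =>
        simp only [hf, Option.getD_none] at ih
        simp [ih.1, ih.2]
      | some k =>
        simp only [hf, Option.getD_some] at ih
        simp [ih.1, ih.2]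

-- ===== VERDICT (by name: the statement is the Claim_ definition above) =====
theorem extract_quoted_text_spec : Claim_equal_extract_quoted_text := by
  intro body _
  unfold Spec_extract_quoted_text extract_quoted_text extract_quoted_text_alt
  have hl := pvLoopA_false ((PySem.Str.split? body "\n").getD []) [] []
  have hd := pvFindIdx_take_drop pvIsTrigger ((PySem.Str.split? body "\n").getD [])
  simp only [List.nil_append] at hl
  simp only [hl, hd.1, hd.2]
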